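-- pv_equiv track=rewrite | github.com/krisHans3n/ifd_standardised_api_prod | src/initialise_image_process.py | compress_common_lst
-- ===== SOURCE A (Python) =====
-- def compress_common_lst(arr):
--     fin = []
--     strings_seen = []
--     for i in arr:
--         if i[0] not in strings_seen:
--             fin.append(i)
--             strings_seen.append(i[0])
--     return fin
-- ===== SOURCE B (Python) =====
-- def compress_common_lst(arr):
--     if not arr:
--         return []
--     head = arr[0]
--     rest = [x for x in arr[1:] if x[0] != head[0]]
--     return [head] + compress_common_lst(rest)
-- ===== Notes on version B (the rewrite author's own statement) =====
-- stated objective: alternative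
-- what changed: Replaces the single accumulator pass with a seen-keys list by a head-and-filter recursion: keep the head, delete every later item sharing its first-element key from the tail, and recurse on the shrunken tail; no seen-set or membership test is maintained at all.
import Mathlib
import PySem

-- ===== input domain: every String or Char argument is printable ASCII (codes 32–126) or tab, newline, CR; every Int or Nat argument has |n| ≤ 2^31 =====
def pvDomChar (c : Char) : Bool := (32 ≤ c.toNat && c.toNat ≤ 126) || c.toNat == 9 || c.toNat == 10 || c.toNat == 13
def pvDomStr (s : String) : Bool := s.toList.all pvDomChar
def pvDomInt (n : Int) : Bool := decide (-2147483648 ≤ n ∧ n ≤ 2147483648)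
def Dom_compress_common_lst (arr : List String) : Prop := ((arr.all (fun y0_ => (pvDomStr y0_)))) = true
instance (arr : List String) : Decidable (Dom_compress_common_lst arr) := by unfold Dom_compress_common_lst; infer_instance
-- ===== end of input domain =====

-- B replaces A's seen-list accumulator pass by a head-and-filter recursion (alternative decomposition);
-- equivalence is proved for the return value on lists without the empty string (where both raise IndexError).


-- ===== PORT A =====
-- i[0] → PySem.Str.pyGet? i 0 (none = IndexError on the empty string, excluded by Pre_;
-- there the loop state is left unchanged — unreachable under Pre_).
def compress_common_lst (arr : List String) : List String :=
  (arr.foldl (fun (st : List String × List Char) i =>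
      match PySem.Str.pyGet? i 0 with
      | none => st
      | some c => if c ∈ st.2 then st else (st.1 ++ [i], st.2 ++ [c]))
    ([], [])).1

-- ===== PORT B =====
-- head-and-filter recursion; head[0]/x[0] → PySem.Str.pyGet? (none = IndexError on "",
-- excluded by Pre_; there the head is kept and the tail left unfiltered — unreachable under Pre_).
def compress_common_lst_alt : List String → List String
  | [] => []
  | h :: t =>
    match PySem.Str.pyGet? h 0 with
    | none => h :: compress_common_lst_alt t
    | some c => h :: compress_common_lst_alt (t.filter (fun x => !(PySem.Str.pyGet? x 0 == some c)))
  termination_by arr => arr.length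
  decreasing_by
    · simp
    · simp only [List.length_unattach]
      exact Nat.lt_succ_of_le (le_trans (List.length_filter_le _ _) (by simp))

-- ===== PRECONDITION & SPEC =====
-- Pre_ excludes lists containing the empty string, on which both A and B raise IndexError at [0].
def Pre_compress_common_lst (arr : List String) : Prop := ∀ s ∈ arr, s ≠ ""
instance (arr : List String) : Decidable (Pre_compress_common_lst arr) := by unfold Pre_compress_common_lst; infer_instance
def pvWitness_compress_common_lst : List String := ["apple", "avocado", "berry", "b", "cherry"]

def Spec_compress_common_lst (arr : List String) (out : List String) : Prop := out = compress_common_lst_alt arr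
instance (arr : List String) (out : List String) : Decidable (Spec_compress_common_lst arr out) := by unfold Spec_compress_common_lst; infer_instance

-- ===== CLAIM (what is proved, stated in full; the proofs are below) =====
def Claim_equal_compress_common_lst : Prop := ∀ (arr : List String), Dom_compress_common_lst arr → Pre_compress_common_lst arr → Spec_compress_common_lst arr (compress_common_lst arr)

-- ===== LEMMAS AND PROOFS =====

-- A nonempty string has a first character.
theorem pyGet0_isSome (s : String) (hs : s ≠ "") : ∃ c, PySem.Str.pyGet? s 0 = some c := by
  have h : s.toList ≠ [] := fun h => hs (by cases s; simp_all)
  cases hl : s.toList with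
  | nil => exact absurd hl h
  | cons c cs =>
    refine ⟨c, ?_⟩
    have h0 : PySem.Str.pyGet? s ((0:Nat):Int) = s.toList[(0:Nat)]? := PySem.Str.pyGet?_natCast s 0
    rw [hl] at h0; simpa using h0

-- B's cons equation when the head has a first character.
theorem alt_cons (h : String) (t : List String) (c : Char) (hg : PySem.Str.pyGet? h 0 = some c) :
    compress_common_lst_alt (h :: t)
      = h :: compress_common_lst_alt (t.filter (fun x => !(PySem.Str.pyGet? x 0 == some c))) := by
  rw [compress_common_lst_alt, hg]

-- Main invariant: A's fold from state (fin, seen) equals fin ++ B applied to the remainder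
-- with all items whose key was already seen filtered out.
theorem compress_loop (arr : List String) (fin : List String) (seen : List Char)
    (hp : ∀ s ∈ arr, s ≠ "") :
    (arr.foldl (fun (st : List String × List Char) i =>
        match PySem.Str.pyGet? i 0 with
        | none => st
        | some c => if c ∈ st.2 then st else (st.1 ++ [i], st.2 ++ [c]))
      (fin, seen)).1
    = fin ++ compress_common_lst_alt
        (arr.filter (fun x => decide (∀ c, PySem.Str.pyGet? x 0 = some c → c ∉ seen))) := by
  induction arr generalizing fin seen with
  | nil => simp [compress_common_lst_alt]
  | cons i rest ih =>
    obtain ⟨c, hg⟩ := pyGet0_isSome i (hp i (by simp))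
    have hrest : ∀ s ∈ rest, s ≠ "" := fun s hs => hp s (by simp [hs])
    simp only [List.foldl_cons, hg, List.filter_cons]
    by_cases hc : c ∈ seen
    · rw [if_pos hc,
        if_neg (show ¬((decide (∀ c1 : Char, some c = some c1 → c1 ∉ seen)) = true) by simp [hc]),
        ih fin seen hrest]
    · rw [if_neg hc,
        if_pos (show (decide (∀ c1 : Char, some c = some c1 → c1 ∉ seen)) = true by simp [hc]),
        ih (fin ++ [i]) (seen ++ [c]) hrest]
      rw [alt_cons i _ c hg, List.filter_filter]
      have hfe : rest.filter (fun x => decide (∀ d, PySem.Str.pyGet? x 0 = some d → d ∉ seen ++ [c]))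
          = rest.filter (fun x => (!(PySem.Str.pyGet? x 0 == some c))
              && decide (∀ d, PySem.Str.pyGet? x 0 = some d → d ∉ seen)) := by
        apply List.filter_congr
        intro x hx
        obtain ⟨d, hd⟩ := pyGet0_isSome x (hrest x hx)
        have hd' : PySem.List.pyGet? x.toList 0 = some d := by simpa using hd
        by_cases hdc : d = c <;> simp [hd', hdc]
      rw [hfe]; simp

-- ===== VERDICT (by name: the statement is the Claim_ definition above) =====
theorem compress_common_lst_spec : Claim_equal_compress_common_lst := by
  intro arr _ hp
  unfold Spec_compress_common_lst compress_common_lst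
  have h := compress_loop arr [] [] hp
  have hfilt : arr.filter (fun x => decide (∀ c, PySem.Str.pyGet? x 0 = some c → c ∉ ([] : List Char))) = arr := by
    apply List.filter_eq_self.mpr; intro x _; simp
  rw [hfilt] at h
  simpa using h
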